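-- pv_equiv track=rewrite | github.com/DanieleSavino/Progettazione_di_Algoritmi | Lezione_1/unione_sottoinsiemi.py | unione_sottoinsiemi_set
-- ===== SOURCE A (Python) =====
-- def unione_sottoinsiemi_set(sets: list[set], S: set):
--     """
--         O(n^2): Nel caso peggiore ci sono solo collisioni e la ricerca nel set avrà complessità O(n),
--         tuttavia in media sarà O(n).
--     """
--
--     seen = set()
--
--     for A in sets:
--         complement = frozenset(S-A)
--         if complement in seen or len(complement) == 0:
--             return True
--         seen.add(frozenset(A))
--
--     return False
-- ===== SOURCE B (Python) =====
-- def unione_sottoinsiemi_set(sets: list[set], S: set):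
--     # Sort-then-scan: canonicalise every set and every complement S - A as a
--     # sorted tuple, merge them into one event list tagged (key, kind, index)
--     # with kind 0 = "a set with this canonical key exists at index",
--     # kind 1 = "index needs a set equal to this key at an earlier index",
--     # sort once lexicographically, and scan groups of equal keys: inside a
--     # group the first kind-0 index is the minimum, so a kind-1 event with a
--     # larger index means some earlier set equals that complement.
--     events = []
--     for i, A in enumerate(sets):
--         comp = S - A
--         if len(comp) == 0:
--             return True
--         events.append((tuple(sorted(A)), 0, i))
--         events.append((tuple(sorted(comp)), 1, i))
--     events.sort()
--     cur = None
--     best = None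
--     for key, kind, idx in events:
--         if key != cur:
--             cur = key
--             best = None
--         if kind == 0:
--             if best is None:
--                 best = idx
--         else:
--             if best is not None and best < idx:
--                 return True
--     return False
-- ===== Notes on version B (the rewrite author's own statement) =====
-- stated objective: alternative
-- what changed: A's single pass maintaining a growing hash set of frozensets is replaced by sort-then-scan: every set and every complement S - A is canonicalised as a sorted tuple tagged (key, kind, index), the tagged list is sorted once lexicographically, and one linear scan over the key groups detects a complement whose key also occurs as a set at a smaller index; the Pre_ only states the set-encoding invariant (duplicate-free lists), which every actual Python set argument satisfies.
import Mathlib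
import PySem

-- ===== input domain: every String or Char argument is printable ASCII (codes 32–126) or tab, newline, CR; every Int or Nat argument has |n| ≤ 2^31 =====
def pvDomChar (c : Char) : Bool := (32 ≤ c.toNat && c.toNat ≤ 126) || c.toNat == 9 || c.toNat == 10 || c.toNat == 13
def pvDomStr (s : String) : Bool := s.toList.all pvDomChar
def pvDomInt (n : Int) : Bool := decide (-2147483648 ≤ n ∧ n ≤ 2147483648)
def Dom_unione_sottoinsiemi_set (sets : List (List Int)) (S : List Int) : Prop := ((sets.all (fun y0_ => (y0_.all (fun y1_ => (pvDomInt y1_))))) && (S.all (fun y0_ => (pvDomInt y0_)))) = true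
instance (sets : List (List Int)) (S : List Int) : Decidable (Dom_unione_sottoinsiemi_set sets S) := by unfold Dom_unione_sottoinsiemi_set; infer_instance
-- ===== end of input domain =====

-- B replaces A's single pass with a maintained hash set of frozensets by a
-- sort-then-scan algorithm: canonical sorted tuples are tagged and sorted once,
-- then one linear scan over key groups finds a complement matching an earlier set.

-- ===== PORT A =====
-- `seen` is a Python set of frozensets; its only uses are membership (by set equality,
-- ported as `any` with PySem.Set.equal — order-independent, exact) and adding the current
-- set (ported as append; a duplicate entry cannot change any later membership test).
def uniteGoA (S : List Int) (seen : List (List Int)) : List (List Int) → Bool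
  | [] => false
  | A :: rest =>
    let complement := PySem.Set.diff S A
    if seen.any (fun s => PySem.Set.equal s complement) || complement.length == 0 then
      true
    else
      uniteGoA S (seen ++ [A]) rest

def unione_sottoinsiemi_set (sets : List (List Int)) (S : List Int) : Bool :=
  uniteGoA S [] sets

-- ===== PORT B =====
-- Python's lexicographic `<` on tuples of ints (used by events.sort()).
def pyLexLt : List Int → List Int → Bool
  | [], [] => false
  | [], _ :: _ => true
  | _ :: _, [] => false
  | x :: xs, y :: ys => decide (x < y) || (x == y && pyLexLt xs ys)

-- Python's `<=` on the event triples (key, kind, idx): tuple lexicographic order.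
def evLe (a b : (List Int × Int × Int)) : Bool :=
  pyLexLt a.1 b.1 || (a.1 == b.1 && (decide (a.2.1 < b.2.1) || (a.2.1 == b.2.1 && decide (a.2.2 ≤ b.2.2))))

-- First loop of Source B: build the tagged event list, `none` = early `return True`
-- (an empty complement was found).
def bBuild (S : List Int) (i : Int) : List (List Int) → Option (List (List Int × Int × Int))
  | [] => some []
  | A :: rest =>
      let comp := PySem.Set.diff S A
      if comp.length == 0 then none
      else
        match bBuild S (i + 1) rest with
        | none => none
        | some evs =>
            some ((PySem.List.sorted A (fun x => x) false, 0, i)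
              :: (PySem.List.sorted comp (fun x => x) false, 1, i) :: evs)

-- Second loop of Source B: scan the sorted events with state (cur, best).
def scanEv : Option (List Int) → Option Int → List (List Int × Int × Int) → Bool
  | _, _, [] => false
  | cur, best, (key, kind, idx) :: rest =>
      let cur' := if cur == some key then cur else some key
      let best' := if cur == some key then best else none
      if kind == 0 then
        scanEv cur' (if best' == none then some idx else best') rest
      else
        match best' with
        | some b => if decide (b < idx) then true else scanEv cur' best' rest
        | none => scanEv cur' best' rest

-- events.sort() is ported as a stable merge sort under Python's tuple order evLe;
-- all event triples are distinct, so this is exactly Python's sorted order.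
def unione_sottoinsiemi_set_alt (sets : List (List Int)) (S : List Int) : Bool :=
  match bBuild S 0 sets with
  | none => true
  | some evs => scanEv none none (evs.mergeSort evLe)

-- ===== PRECONDITION & SPEC =====
-- Pre_ states the representation invariant of the Python `set` arguments under the
-- type convention (a set is a list of its DISTINCT elements): S and every member of
-- sets are duplicate-free lists. Every actual Python input satisfies it; lists with
-- duplicates encode no Python set, and there the two canonicalisations (membership
-- vs multiset) legitimately diverge.
def Pre_unione_sottoinsiemi_set (sets : List (List Int)) (S : List Int) : Prop :=
  S.Nodup ∧ ∀ A ∈ sets, A.Nodup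
instance (sets : List (List Int)) (S : List Int) : Decidable (Pre_unione_sottoinsiemi_set sets S) := by unfold Pre_unione_sottoinsiemi_set; infer_instance

def pvWitness_unione_sottoinsiemi_set : List (List Int) × List Int := ([[1], [2]], [1, 2])

def Spec_unione_sottoinsiemi_set (sets : List (List Int)) (S : List Int) (out : Bool) : Prop := out = unione_sottoinsiemi_set_alt sets S
instance (sets : List (List Int)) (S : List Int) (out : Bool) : Decidable (Spec_unione_sottoinsiemi_set sets S out) := by unfold Spec_unione_sottoinsiemi_set; infer_instance

-- ===== CLAIM (what is proved, stated in full; the proofs are below) =====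
def Claim_equal_unione_sottoinsiemi_set : Prop := ∀ (sets : List (List Int)) (S : List Int), Dom_unione_sottoinsiemi_set sets S → Pre_unione_sottoinsiemi_set sets S → Spec_unione_sottoinsiemi_set sets S (unione_sottoinsiemi_set sets S)

-- ===== LEMMAS AND PROOFS =====

-- ---- order facts about pyLexLt / evLe ----
theorem pyLexLt_irrefl : ∀ a : List Int, pyLexLt a a = false := by
  intro a; induction a with
  | nil => rfl
  | cons x xs ih => simp [pyLexLt, ih]

theorem pyLexLt_trans : ∀ a b c : List Int,
    pyLexLt a b = true → pyLexLt b c = true → pyLexLt a c = true := by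
  intro a
  induction a with
  | nil => intro b c hab hbc; cases b <;> cases c <;> simp_all [pyLexLt]
  | cons x xs ih =>
    intro b c hab hbc
    cases b with
    | nil => simp [pyLexLt] at hab
    | cons y ys =>
      cases c with
      | nil => simp [pyLexLt] at hbc
      | cons z zs =>
        simp only [pyLexLt, Bool.or_eq_true, Bool.and_eq_true, decide_eq_true_eq,
          beq_iff_eq] at hab hbc ⊢
        rcases hab with h1 | ⟨he1, h1⟩ <;> rcases hbc with h2 | ⟨he2, h2⟩
        · exact Or.inl (lt_trans h1 h2)
        · exact Or.inl (he2 ▸ h1)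
        · exact Or.inl (he1 ▸ h2)
        · exact Or.inr ⟨he1.trans he2, ih _ _ h1 h2⟩

theorem pyLexLt_antisymm : ∀ a b : List Int,
    pyLexLt a b = false → pyLexLt b a = false → a = b := by
  intro a
  induction a with
  | nil => intro b h1 _; cases b with
    | nil => rfl
    | cons y ys => simp [pyLexLt] at h1
  | cons x xs ih =>
    intro b h1 h2
    cases b with
    | nil => simp [pyLexLt] at h2
    | cons y ys =>
      simp only [pyLexLt, Bool.or_eq_false_iff, Bool.and_eq_false_iff,
        decide_eq_false_iff_not, beq_eq_false_iff_ne, ne_eq, not_lt] at h1 h2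
      have hxy : x = y := le_antisymm h2.1 h1.1
      rcases h1.2 with h | h
      · exact absurd hxy h
      · rcases h2.2 with h' | h'
        · exact absurd hxy.symm h'
        · exact hxy ▸ (ih ys h h' ▸ rfl)

theorem pyLexLt_asymm (a b : List Int) (h : pyLexLt a b = true) : pyLexLt b a = false := by
  by_contra hc
  have hc' : pyLexLt b a = true := by revert hc; cases pyLexLt b a <;> simp
  have := pyLexLt_trans a b a h hc'
  rw [pyLexLt_irrefl] at this; exact absurd this (by simp)

theorem evLe_total : ∀ a b : (List Int × Int × Int), (evLe a b || evLe b a) = true := by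
  rintro ⟨k1, t1, i1⟩ ⟨k2, t2, i2⟩
  by_cases hlt : pyLexLt k1 k2 = true
  · simp [evLe, hlt]
  · by_cases hgt : pyLexLt k2 k1 = true
    · simp [evLe, hgt]
    · have hk : k1 = k2 := pyLexLt_antisymm _ _ (by revert hlt; cases pyLexLt k1 k2 <;> simp)
        (by revert hgt; cases pyLexLt k2 k1 <;> simp)
      subst hk
      simp only [evLe, beq_self_eq_true, Bool.true_and]
      by_cases ht : t1 = t2
      · subst ht; simp; omega
      · simp; omega

theorem evLe_trans : ∀ a b c : (List Int × Int × Int),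
    evLe a b = true → evLe b c = true → evLe a c = true := by
  rintro ⟨k1, t1, i1⟩ ⟨k2, t2, i2⟩ ⟨k3, t3, i3⟩ hab hbc
  simp only [evLe, Bool.or_eq_true, Bool.and_eq_true, decide_eq_true_eq, beq_iff_eq] at hab hbc ⊢
  rcases hab with h1 | ⟨he1, h1⟩
  · rcases hbc with h2 | ⟨he2, _⟩
    · exact Or.inl (pyLexLt_trans _ _ _ h1 h2)
    · exact Or.inl (he2 ▸ h1)
  · rcases hbc with h2 | ⟨he2, h2⟩
    · exact Or.inl (he1 ▸ h2)
    · refine Or.inr ⟨he1.trans he2, ?_⟩; omega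


theorem evLe_keyLe {a b : (List Int × Int × Int)} (h : evLe a b = true) :
    (pyLexLt a.1 b.1 || a.1 == b.1) = true := by
  simp only [evLe, Bool.or_eq_true, Bool.and_eq_true] at h
  rcases h with h | ⟨h, _⟩ <;> simp [h]

theorem keyLe_antisymm {a b : List Int}
    (h1 : (pyLexLt a b || a == b) = true) (h2 : (pyLexLt b a || b == a) = true) : a = b := by
  rcases Bool.or_eq_true_iff.mp h1 with h1 | h1
  · rcases Bool.or_eq_true_iff.mp h2 with h2 | h2
    · have := pyLexLt_asymm a b h1; rw [this] at h2; exact absurd h2 (by simp)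
    · exact (beq_iff_eq.mp h2).symm
  · exact beq_iff_eq.mp h1

-- ---- A-side loop invariant: uniteGoA over a prefixing `seen` equals a range scan ----
theorem uniteGoA_eq_range (S : List Int) :
    ∀ (l seen : List (List Int)),
      uniteGoA S seen l =
        (List.range l.length).any (fun i =>
          let comp := PySem.Set.diff S (l.getD i [])
          seen.any (fun s => PySem.Set.equal s comp) ||
            ((List.range i).any (fun j => PySem.Set.equal (l.getD j []) comp) ||
              comp.length == 0)) := by
  intro l
  induction l with
  | nil => intro seen; simp [uniteGoA]
  | cons A rest ih =>
    intro seen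
    rw [uniteGoA]
    simp only [List.length_cons, List.range_succ_eq_map, List.any_cons, List.any_map,
      List.getD_cons_zero]
    by_cases h : (seen.any (fun s => PySem.Set.equal s (PySem.Set.diff S A)) ||
        (PySem.Set.diff S A).length == 0) = true
    · simp only [h]
      cases hs : seen.any (fun s => PySem.Set.equal s (PySem.Set.diff S A)) <;>
        simp_all
    · rw [if_neg h, ih]
      cases hs : seen.any (fun s => PySem.Set.equal s (PySem.Set.diff S A)) <;>
        cases hl : ((PySem.Set.diff S A).length == 0) <;> simp_all
      · apply PySem.List.any_congr_mem
        intro i _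
        simp only [Function.comp_apply, List.getElem?_cons_succ]
        rw [List.range_succ_eq_map]
        simp only [List.any_cons, List.any_map, Function.comp_def, List.getElem?_cons_succ,
          List.getElem?_cons_zero, Option.getD_some]
        cases PySem.Set.equal A (PySem.Set.diff S (rest[i]?.getD [])) <;>
          cases (List.range i).any
              (fun j => PySem.Set.equal (rest[j]?.getD []) (PySem.Set.diff S (rest[i]?.getD []))) <;>
            simp

theorem A_true_iff (sets : List (List Int)) (S : List Int) :
    unione_sottoinsiemi_set sets S = true ↔
      ∃ m : Nat, m < sets.length ∧ (PySem.Set.diff S (sets.getD m []) = [] ∨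
        ∃ j : Nat, j < m ∧
          PySem.Set.equal (sets.getD j []) (PySem.Set.diff S (sets.getD m [])) = true) := by
  unfold unione_sottoinsiemi_set
  rw [uniteGoA_eq_range]
  simp only [List.any_eq_true, List.mem_range, List.any_nil, Bool.false_or, Bool.or_eq_true,
    beq_iff_eq, List.length_eq_zero_iff]
  constructor
  · rintro ⟨m, hm, h | h⟩
    · rcases h with ⟨j, hj, hje⟩; exact ⟨m, hm, Or.inr ⟨j, hj, hje⟩⟩
    · exact ⟨m, hm, Or.inl h⟩
  · rintro ⟨m, hm, h | ⟨j, hj, hje⟩⟩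
    · exact ⟨m, hm, Or.inr h⟩
    · exact ⟨m, hm, Or.inl ⟨j, hj, hje⟩⟩

-- ---- bBuild characterisations ----
theorem bBuild_eq_none_iff (S : List Int) :
    ∀ (l : List (List Int)) (i0 : Int),
      bBuild S i0 l = none ↔ ∃ m : Nat, m < l.length ∧ PySem.Set.diff S (l.getD m []) = [] := by
  intro l
  induction l with
  | nil => intro i0; simp [bBuild]
  | cons A rest ih =>
    intro i0
    rw [bBuild]
    by_cases h : ((PySem.Set.diff S A).length == 0) = true
    · rw [if_pos h]
      constructor
      · intro _
        exact ⟨0, by simp, by simpa [List.length_eq_zero_iff] using h⟩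
      · intro _; rfl
    · rw [if_neg h]
      cases hb : bBuild S (i0 + 1) rest with
      | none =>
        simp only [true_iff]
        rcases (ih (i0 + 1)).mp hb with ⟨m, hm, he⟩
        exact ⟨m + 1, by simpa using hm, by simpa using he⟩
      | some evs =>
        simp only [reduceCtorEq, false_iff, not_exists]
        intro m
        rintro ⟨hm, he⟩
        cases m with
        | zero =>
          simp only [List.getD_cons_zero] at he
          rw [he] at h; simp at h
        | succ m' =>
          have : bBuild S (i0 + 1) rest = none :=
            (ih (i0 + 1)).mpr ⟨m', by simpa using hm, by simpa using he⟩
          rw [this] at hb; exact absurd hb (by simp)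

theorem bBuild_mem (S : List Int) :
    ∀ (l : List (List Int)) (i0 : Int) (evs : List (List Int × Int × Int)),
      bBuild S i0 l = some evs →
      ∀ (k : List Int) (t x : Int),
        ((k, t, x) ∈ evs ↔ ∃ m : Nat, m < l.length ∧ x = i0 + m ∧
          ((t = 0 ∧ k = PySem.List.sorted (l.getD m []) (fun y => y) false) ∨
           (t = 1 ∧ k = PySem.List.sorted (PySem.Set.diff S (l.getD m [])) (fun y => y) false))) := by
  intro l
  induction l with
  | nil =>
    intro i0 evs hb k t x
    simp only [bBuild, Option.some.injEq] at hb
    subst hb; simp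
  | cons A rest ih =>
    intro i0 evs hb k t x
    rw [bBuild] at hb
    by_cases h : ((PySem.Set.diff S A).length == 0) = true
    · rw [if_pos h] at hb; exact absurd hb (by simp)
    · rw [if_neg h] at hb
      cases hb2 : bBuild S (i0 + 1) rest with
      | none => rw [hb2] at hb; exact absurd hb (by simp)
      | some evs' =>
        rw [hb2] at hb
        simp only [Option.some.injEq] at hb
        subst hb
        have hrest := ih (i0 + 1) evs' hb2 k t x
        simp only [List.mem_cons, hrest, Prod.mk.injEq]
        constructor
        · rintro (⟨hk, ht, hx⟩ | ⟨hk, ht, hx⟩ | ⟨m, hm, hx, hcase⟩)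
          · exact ⟨0, by simp, by omega, Or.inl ⟨ht, hk⟩⟩
          · exact ⟨0, by simp, by omega, Or.inr ⟨ht, hk⟩⟩
          · refine ⟨m + 1, by simpa using hm, by omega, ?_⟩
            simpa using hcase
        · rintro ⟨m, hm, hx, hcase⟩
          cases m with
          | zero =>
            simp only [List.getD_cons_zero] at hcase
            rcases hcase with ⟨ht, hk⟩ | ⟨ht, hk⟩
            · exact Or.inl ⟨hk, ht, by omega⟩
            · exact Or.inr (Or.inl ⟨hk, ht, by omega⟩)
          | succ m' =>
            refine Or.inr (Or.inr ⟨m', by simpa using hm, by omega, ?_⟩)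
            simpa using hcase

-- ---- canonical-key bridge ----
theorem sorted_eq_iff_equal (a c : List Int) (ha : a.Nodup) (hc : c.Nodup) :
    (PySem.List.sorted a (fun y => y) false = PySem.List.sorted c (fun y => y) false) ↔
      PySem.Set.equal a c = true := by
  rw [PySem.Set.equal_iff, PySem.List.sorted_id_eq_sorted_id_iff_perm,
    List.perm_ext_iff_of_nodup ha hc]

-- ---- reduction lemmas for one scan step ----
theorem scan_red_0t (key : List Int) (idx : Int) (rest : List (List Int × Int × Int))
    (cur : Option (List Int)) (best : Option Int) (hc : cur = some key) (hb : best = none) :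
    scanEv cur best ((key, (0:Int), idx) :: rest) = scanEv cur (some idx) rest := by
  subst hc; subst hb; simp [scanEv]

theorem scan_red_0s (key : List Int) (idx b : Int) (rest : List (List Int × Int × Int))
    (cur : Option (List Int)) (best : Option Int) (hc : cur = some key) (hb : best = some b) :
    scanEv cur best ((key, (0:Int), idx) :: rest) = scanEv cur best rest := by
  subst hc; subst hb; simp [scanEv]

theorem scan_red_0n (key : List Int) (idx : Int) (rest : List (List Int × Int × Int))
    (cur : Option (List Int)) (best : Option Int) (hc : cur ≠ some key) :
    scanEv cur best ((key, (0:Int), idx) :: rest) = scanEv (some key) (some idx) rest := by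
  have hcb : (cur == some key) = false := by simpa using hc
  simp [scanEv, hcb]

theorem scan_red_1s (key : List Int) (idx b : Int) (rest : List (List Int × Int × Int))
    (cur : Option (List Int)) (best : Option Int) (hc : cur = some key) (hb : best = some b) :
    scanEv cur best ((key, (1:Int), idx) :: rest) =
      if b < idx then true else scanEv cur best rest := by
  subst hc; subst hb; simp [scanEv]

theorem scan_red_1n_none (key : List Int) (idx : Int) (rest : List (List Int × Int × Int))
    (cur : Option (List Int)) (best : Option Int) (hc : cur = some key) (hb : best = none) :
    scanEv cur best ((key, (1:Int), idx) :: rest) = scanEv cur none rest := by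
  subst hc; subst hb; simp [scanEv]

theorem scan_red_1n_reset (key : List Int) (idx : Int) (rest : List (List Int × Int × Int))
    (cur : Option (List Int)) (best : Option Int) (hc : cur ≠ some key) :
    scanEv cur best ((key, (1:Int), idx) :: rest) = scanEv (some key) none rest := by
  have hcb : (cur == some key) = false := by simpa using hc
  simp [scanEv, hcb]

-- ---- scan soundness: a `true` comes from a genuine pair (no order assumption) ----
theorem scan_sound : ∀ (es : List (List Int × Int × Int)) (cur : Option (List Int)) (best : Option Int),
    (∀ e ∈ es, e.2.1 = 0 ∨ e.2.1 = 1) →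
    scanEv cur best es = true →
    (∃ k j i, (k, (0:Int), j) ∈ es ∧ (k, (1:Int), i) ∈ es ∧ j < i) ∨
      (∃ k b i, cur = some k ∧ best = some b ∧ (k, (1:Int), i) ∈ es ∧ b < i) := by
  intro es
  induction es with
  | nil => intro cur best _ h; simp [scanEv] at h
  | cons e rest ih =>
    obtain ⟨key, kind, idx⟩ := e
    intro cur best hk h
    have hkinds : ∀ e ∈ rest, e.2.1 = 0 ∨ e.2.1 = 1 := fun e he => hk e (List.mem_cons_of_mem _ he)
    have hkind01 : kind = 0 ∨ kind = 1 := hk (key, kind, idx) (by simp)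
    rcases hkind01 with rfl | rfl
    · by_cases hc : cur = some key
      · cases hbest : best with
        | none =>
          rw [scan_red_0t key idx rest cur best hc hbest] at h
          rcases ih cur (some idx) hkinds h with ⟨k, j, i, h1, h2, h3⟩ | ⟨k, b, i, h1, h2, h3, h4⟩
          · exact Or.inl ⟨k, j, i, List.mem_cons_of_mem _ h1, List.mem_cons_of_mem _ h2, h3⟩
          · rw [hc] at h1
            injection h1 with h1'
            injection h2 with h2'
            subst h1'
            exact Or.inl ⟨key, idx, i, by simp, List.mem_cons_of_mem _ h3, by omega⟩
        | some b0 =>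
          rw [scan_red_0s key idx b0 rest cur best hc hbest] at h
          rcases ih cur best hkinds h with ⟨k, j, i, h1, h2, h3⟩ | ⟨k, b, i, h1, h2, h3, h4⟩
          · exact Or.inl ⟨k, j, i, List.mem_cons_of_mem _ h1, List.mem_cons_of_mem _ h2, h3⟩
          · exact Or.inr ⟨k, b, i, h1, hbest.symm.trans h2, List.mem_cons_of_mem _ h3, h4⟩
      · rw [scan_red_0n key idx rest cur best hc] at h
        rcases ih (some key) (some idx) hkinds h with ⟨k, j, i, h1, h2, h3⟩ | ⟨k, b, i, h1, h2, h3, h4⟩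
        · exact Or.inl ⟨k, j, i, List.mem_cons_of_mem _ h1, List.mem_cons_of_mem _ h2, h3⟩
        · injection h1 with h1'
          injection h2 with h2'
          subst h1'
          exact Or.inl ⟨key, idx, i, by simp, List.mem_cons_of_mem _ h3, by omega⟩
    · by_cases hc : cur = some key
      · cases hbest : best with
        | none =>
          rw [scan_red_1n_none key idx rest cur best hc hbest] at h
          rcases ih cur none hkinds h with ⟨k, j, i, h1, h2, h3⟩ | ⟨k, b, i, h1, h2, h3, h4⟩
          · exact Or.inl ⟨k, j, i, List.mem_cons_of_mem _ h1, List.mem_cons_of_mem _ h2, h3⟩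
          · exact absurd h2 (by simp)
        | some b0 =>
          rw [scan_red_1s key idx b0 rest cur best hc hbest] at h
          by_cases hlt : b0 < idx
          · exact Or.inr ⟨key, b0, idx, hc, rfl, by simp, hlt⟩
          · rw [if_neg hlt] at h
            rcases ih cur best hkinds h with ⟨k, j, i, h1, h2, h3⟩ | ⟨k, b, i, h1, h2, h3, h4⟩
            · exact Or.inl ⟨k, j, i, List.mem_cons_of_mem _ h1, List.mem_cons_of_mem _ h2, h3⟩
            · exact Or.inr ⟨k, b, i, h1, hbest.symm.trans h2, List.mem_cons_of_mem _ h3, h4⟩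
      · rw [scan_red_1n_reset key idx rest cur best hc] at h
        rcases ih (some key) none hkinds h with ⟨k, j, i, h1, h2, h3⟩ | ⟨k, b, i, h1, h2, h3, h4⟩
        · exact Or.inl ⟨k, j, i, List.mem_cons_of_mem _ h1, List.mem_cons_of_mem _ h2, h3⟩
        · exact absurd h2 (by simp)

-- ---- scan completeness on a sorted event list ----
theorem scan_complete : ∀ (es : List (List Int × Int × Int)) (cur : Option (List Int)) (best : Option Int)
    (k : List Int) (i : Int),
    List.Pairwise (fun a b => evLe a b = true) es →
    (∀ e ∈ es, e.2.1 = 0 ∨ e.2.1 = 1) →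
    (∀ kc, cur = some kc → ∀ e ∈ es, (pyLexLt kc e.1 || kc == e.1) = true) →
    (∀ kc b, cur = some kc → best = some b → ∀ x, (kc, (0:Int), x) ∈ es → b ≤ x) →
    (k, (1:Int), i) ∈ es →
    ((∃ j, (k, (0:Int), j) ∈ es ∧ j < i) ∨ (cur = some k ∧ ∃ b, best = some b ∧ b < i)) →
    scanEv cur best es = true := by
  intro es
  induction es with
  | nil => intro cur best k i _ _ _ _ htgt _; simp at htgt
  | cons e rest ih =>
    obtain ⟨key, kind, idx⟩ := e
    intro cur best k i hpw hk hinva hinvb htgt H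
    obtain ⟨hhead, hpwr⟩ := List.pairwise_cons.mp hpw
    have hkinds : ∀ e ∈ rest, e.2.1 = 0 ∨ e.2.1 = 1 := fun e he => hk e (List.mem_cons_of_mem _ he)
    have hinva' : ∀ e ∈ rest, (pyLexLt key e.1 || key == e.1) = true :=
      fun e he => evLe_keyLe (hhead e he)
    have hinvaR : ∀ kc, cur = some kc → ∀ e ∈ rest, (pyLexLt kc e.1 || kc == e.1) = true :=
      fun kc hkc e he => hinva kc hkc e (List.mem_cons_of_mem _ he)
    have hinvbR : ∀ kc b, cur = some kc → best = some b → ∀ x, (kc, (0:Int), x) ∈ rest → b ≤ x :=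
      fun kc b hkc hb x hx => hinvb kc b hkc hb x (List.mem_cons_of_mem _ hx)
    have hkind01 : kind = 0 ∨ kind = 1 := hk (key, kind, idx) (by simp)
    rcases hkind01 with rfl | rfl
    · -- head is a kind-0 event; the kind-1 target is in the tail
      have htgt' : (k, (1:Int), i) ∈ rest := by
        rcases List.mem_cons.mp htgt with hh | hh
        · exfalso; simp [Prod.ext_iff] at hh
        · exact hh
      have hmin : ∀ y, (key, (0:Int), y) ∈ rest → idx ≤ y := by
        intro y hy
        have := hhead _ hy
        simp [evLe, pyLexLt_irrefl] at this
        exact this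
      have hinvaNew : ∀ kc, (some key : Option (List Int)) = some kc →
          ∀ e ∈ rest, (pyLexLt kc e.1 || kc == e.1) = true := by
        intro kc hkc e he; injection hkc with h1; subst h1; exact hinva' e he
      have hinvbNew : ∀ kc b, (some key : Option (List Int)) = some kc →
          (some idx : Option Int) = some b → ∀ x, (kc, (0:Int), x) ∈ rest → b ≤ x := by
        intro kc b hkc hb x hx
        injection hkc with h1; injection hb with h2
        subst h1; subst h2
        exact hmin x hx
      by_cases hkey : key = k
      · subst hkey
        rcases H with ⟨j, hjmem, hji⟩ | ⟨hck, b, hb, hbi⟩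
        · have hidxi : idx < i := by
            rcases List.mem_cons.mp hjmem with hh | hh
            · have : j = idx := by simpa [Prod.ext_iff] using hh
              omega
            · have := hmin j hh; omega
          by_cases hc : cur = some key
          · cases hbest : best with
            | some b =>
              rw [scan_red_0s key idx b rest cur (some b) hc rfl]
              have hbj : b ≤ j := hinvb key b hc hbest j hjmem
              exact ih cur (some b) key i hpwr hkinds hinvaR
                (fun kc b' hkc hb' x hx =>
                  hinvb kc b' hkc (hbest.trans hb') x (List.mem_cons_of_mem _ hx))
                htgt' (Or.inr ⟨hc, b, rfl, by omega⟩)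
            | none =>
              rw [scan_red_0t key idx rest cur none hc rfl]
              refine ih cur (some idx) key i hpwr hkinds hinvaR ?_ htgt'
                (Or.inr ⟨hc, idx, rfl, hidxi⟩)
              intro kc b hkc hb x hx
              rw [hc] at hkc
              exact hinvbNew kc b hkc hb x hx
          · rw [scan_red_0n key idx rest cur best hc]
            exact ih (some key) (some idx) key i hpwr hkinds hinvaNew hinvbNew htgt'
              (Or.inr ⟨rfl, idx, rfl, hidxi⟩)
        · have hc : cur = some key := hck
          rw [scan_red_0s key idx b rest cur best hc hb]
          exact ih cur best key i hpwr hkinds hinvaR hinvbR htgt'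
            (Or.inr ⟨hck, b, hb, hbi⟩)
      · rcases H with ⟨j, hjmem, hji⟩ | ⟨hck, b, hb, hbi⟩
        · have hjm' : (k, (0:Int), j) ∈ rest := by
            rcases List.mem_cons.mp hjmem with hh | hh
            · exfalso
              have hkk : k = key := by
                simp [Prod.ext_iff] at hh
                exact hh.1
              exact hkey hkk.symm
            · exact hh
          by_cases hc : cur = some key
          · cases hbest : best with
            | some b =>
              rw [scan_red_0s key idx b rest cur (some b) hc rfl]
              exact ih cur (some b) k i hpwr hkinds hinvaR
                (fun kc b' hkc hb' x hx =>
                  hinvb kc b' hkc (hbest.trans hb') x (List.mem_cons_of_mem _ hx))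
                htgt' (Or.inl ⟨j, hjm', hji⟩)
            | none =>
              rw [scan_red_0t key idx rest cur none hc rfl]
              refine ih cur (some idx) k i hpwr hkinds hinvaR ?_ htgt' (Or.inl ⟨j, hjm', hji⟩)
              intro kc b hkc hb x hx
              rw [hc] at hkc
              exact hinvbNew kc b hkc hb x hx
          · rw [scan_red_0n key idx rest cur best hc]
            exact ih (some key) (some idx) k i hpwr hkinds hinvaNew hinvbNew htgt'
              (Or.inl ⟨j, hjm', hji⟩)
        · exfalso
          have h1 : (pyLexLt k key || k == key) = true :=
            hinva k hck (key, (0:Int), idx) (by simp)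
          have h2 : (pyLexLt key k || key == k) = true := evLe_keyLe (hhead _ htgt')
          exact hkey (keyLe_antisymm h2 h1)
    · -- head is a kind-1 event
      rcases H with ⟨j, hjmem, hji⟩ | ⟨hck, b, hb, hbi⟩
      · have hjm' : (k, (0:Int), j) ∈ rest := by
          rcases List.mem_cons.mp hjmem with hh | hh
          · exfalso; simp [Prod.ext_iff] at hh
          · exact hh
        by_cases hkey : key = k
        · subst hkey
          exfalso
          have := hhead _ hjm'
          simp [evLe, pyLexLt_irrefl] at this
        · have htgt' : (k, (1:Int), i) ∈ rest := by
            rcases List.mem_cons.mp htgt with hh | hh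
            · exfalso
              have hkk : k = key := by
                simp [Prod.ext_iff] at hh
                exact hh.1
              exact hkey hkk.symm
            · exact hh
          have hinvaNew : ∀ kc, (some key : Option (List Int)) = some kc →
              ∀ e ∈ rest, (pyLexLt kc e.1 || kc == e.1) = true := by
            intro kc hkc e he; injection hkc with h1; subst h1; exact hinva' e he
          have hinvbVac : ∀ kc b, (some key : Option (List Int)) = some kc →
              (none : Option Int) = some b → ∀ x, (kc, (0:Int), x) ∈ rest → b ≤ x := by
            intro kc b _ hb; exact absurd hb (by simp)
          have hinvbVac' : ∀ kc b, cur = some kc →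
              (none : Option Int) = some b → ∀ x, (kc, (0:Int), x) ∈ rest → b ≤ x := by
            intro kc b _ hb; exact absurd hb (by simp)
          by_cases hc : cur = some key
          · cases hbest : best with
            | some b =>
              rw [scan_red_1s key idx b rest cur (some b) hc rfl]
              by_cases hlt : b < idx
              · simp [hlt]
              · rw [if_neg hlt]
                exact ih cur (some b) k i hpwr hkinds hinvaR
                  (fun kc b' hkc hb' x hx =>
                    hinvb kc b' hkc (hbest.trans hb') x (List.mem_cons_of_mem _ hx))
                  htgt' (Or.inl ⟨j, hjm', hji⟩)
            | none =>
              rw [scan_red_1n_none key idx rest cur none hc rfl]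
              exact ih cur none k i hpwr hkinds hinvaR hinvbVac' htgt' (Or.inl ⟨j, hjm', hji⟩)
          · rw [scan_red_1n_reset key idx rest cur best hc]
            exact ih (some key) none k i hpwr hkinds hinvaNew hinvbVac htgt' (Or.inl ⟨j, hjm', hji⟩)
      · by_cases hkey : key = k
        · subst hkey
          rw [scan_red_1s key idx b rest cur best hck hb]
          by_cases hlt : b < idx
          · simp [hlt]
          · have htgt' : (key, (1:Int), i) ∈ rest := by
              rcases List.mem_cons.mp htgt with hh | hh
              · exfalso
                have hii : i = idx := by
                  simp [Prod.ext_iff] at hh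
                  exact hh
                omega
              · exact hh
            rw [if_neg hlt]
            exact ih cur best key i hpwr hkinds hinvaR hinvbR htgt' (Or.inr ⟨hck, b, hb, hbi⟩)
        · exfalso
          have htgt' : (k, (1:Int), i) ∈ rest := by
            rcases List.mem_cons.mp htgt with hh | hh
            · exfalso
              have hkk : k = key := by
                simp [Prod.ext_iff] at hh
                exact hh.1
              exact hkey hkk.symm
            · exact hh
          have h1 : (pyLexLt k key || k == key) = true :=
            hinva k hck (key, (1:Int), idx) (by simp)
          have h2 : (pyLexLt key k || key == k) = true := evLe_keyLe (hhead _ htgt')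
          exact hkey (keyLe_antisymm h2 h1)

-- ---- the sorted scan detects exactly the pairs of the event list ----
theorem scan_iff_match (evs : List (List Int × Int × Int))
    (hk : ∀ e ∈ evs, e.2.1 = 0 ∨ e.2.1 = 1) :
    scanEv none none (evs.mergeSort evLe) = true ↔
      ∃ k j i, (k, (0:Int), j) ∈ evs ∧ (k, (1:Int), i) ∈ evs ∧ j < i := by
  have hperm := List.mergeSort_perm evs evLe
  have hk' : ∀ e ∈ evs.mergeSort evLe, e.2.1 = 0 ∨ e.2.1 = 1 :=
    fun e he => hk e (hperm.mem_iff.mp he)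
  have hpw := List.sorted_mergeSort evLe_trans evLe_total evs
  constructor
  · intro h
    rcases scan_sound _ none none hk' h with ⟨k, j, i, h1, h2, h3⟩ | ⟨k, b, i, h1, _⟩
    · exact ⟨k, j, i, hperm.mem_iff.mp h1, hperm.mem_iff.mp h2, h3⟩
    · exact absurd h1 (by simp)
  · rintro ⟨k, j, i, h1, h2, h3⟩
    exact scan_complete _ none none k i hpw hk'
      (fun kc hkc => absurd hkc (by simp))
      (fun kc b hkc _ => absurd hkc (by simp))
      (hperm.mem_iff.mpr h2) (Or.inl ⟨j, hperm.mem_iff.mpr h1, h3⟩)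

-- ===== VERDICT (by name: the statement is the Claim_ definition above) =====
theorem unione_sottoinsiemi_set_spec : Claim_equal_unione_sottoinsiemi_set := by
  intro sets S _ hpre
  unfold Spec_unione_sottoinsiemi_set
  cases hb : bBuild S 0 sets with
  | none =>
    have hBalt : unione_sottoinsiemi_set_alt sets S = true := by
      unfold unione_sottoinsiemi_set_alt; rw [hb]
    rw [hBalt]
    obtain ⟨m, hm, he⟩ := (bBuild_eq_none_iff S sets 0).mp hb
    exact (A_true_iff sets S).mpr ⟨m, hm, Or.inl he⟩
  | some evs =>
    have hBalt : unione_sottoinsiemi_set_alt sets S = scanEv none none (evs.mergeSort evLe) := by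
      unfold unione_sottoinsiemi_set_alt; rw [hb]
    rw [hBalt]
    have hSnd : S.Nodup := hpre.1
    have hset : ∀ m : Nat, m < sets.length → (sets.getD m []).Nodup := by
      intro m hm
      have hmem : sets.getD m [] ∈ sets := by
        rw [List.getD_eq_getElem?_getD, List.getElem?_eq_getElem hm]
        simp only [Option.getD_some]
        exact List.getElem_mem hm
      exact hpre.2 _ hmem
    have hnoempty : ∀ m : Nat, m < sets.length → PySem.Set.diff S (sets.getD m []) ≠ [] := by
      intro m hm he
      have hn : bBuild S 0 sets = none := (bBuild_eq_none_iff S sets 0).mpr ⟨m, hm, he⟩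
      rw [hn] at hb; exact absurd hb (by simp)
    have hkinds : ∀ e ∈ evs, e.2.1 = 0 ∨ e.2.1 = 1 := by
      intro e he
      obtain ⟨k, t, x⟩ := e
      rcases (bBuild_mem S sets 0 evs hb k t x).mp he with ⟨m, _, _, ⟨ht, _⟩ | ⟨ht, _⟩⟩
      · exact Or.inl ht
      · exact Or.inr ht
    have hmatch : (∃ k j i, (k, (0:Int), j) ∈ evs ∧ (k, (1:Int), i) ∈ evs ∧ j < i) ↔
        (∃ m : Nat, m < sets.length ∧ ∃ jn : Nat, jn < m ∧
          PySem.Set.equal (sets.getD jn []) (PySem.Set.diff S (sets.getD m [])) = true) := by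
      constructor
      · rintro ⟨k, j, i, hj, hi, hji⟩
        rcases (bBuild_mem S sets 0 evs hb k 0 j).mp hj with ⟨m1, hm1, hx1, hc1⟩
        rcases hc1 with ⟨_, hk1⟩ | ⟨ht, _⟩
        · rcases (bBuild_mem S sets 0 evs hb k 1 i).mp hi with ⟨m2, hm2, hx2, hc2⟩
          rcases hc2 with ⟨ht2, _⟩ | ⟨_, hk2⟩
          · exact absurd ht2 (by norm_num)
          · refine ⟨m2, hm2, m1, by omega, ?_⟩
            exact (sorted_eq_iff_equal _ _ (hset m1 hm1) (PySem.Set.nodup_diff _ _ hSnd)).mp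
              (hk1.symm.trans hk2)
        · exact absurd ht (by norm_num)
      · rintro ⟨m2, hm2, m1, h12, heq⟩
        have hm1 : m1 < sets.length := by omega
        refine ⟨PySem.List.sorted (sets.getD m1 []) (fun y => y) false,
          (m1 : Int), (m2 : Int), ?_, ?_, ?_⟩
        · exact (bBuild_mem S sets 0 evs hb _ 0 _).mpr ⟨m1, hm1, by omega, Or.inl ⟨rfl, rfl⟩⟩
        · refine (bBuild_mem S sets 0 evs hb _ 1 _).mpr ⟨m2, hm2, by omega, Or.inr ⟨rfl, ?_⟩⟩
          exact (sorted_eq_iff_equal _ _ (hset m1 hm1) (PySem.Set.nodup_diff _ _ hSnd)).mpr heq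
        · exact_mod_cast h12
    rw [Bool.eq_iff_iff, A_true_iff, scan_iff_match evs hkinds, hmatch]
    constructor
    · rintro ⟨m, hm, he | hp⟩
      · exact absurd he (hnoempty m hm)
      · exact ⟨m, hm, hp⟩
    · rintro ⟨m, hm, hp⟩
      exact ⟨m, hm, Or.inr hp⟩
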